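-- pv_equiv track=rewrite | github.com/ameliadai/DENIAHL | data/data_generation/gen_numerical_pattern_data.py | generate_longer_window
-- ===== SOURCE A (Python) =====
-- def generate_longer_window(num_pairs):
--     data = {}
--
--     base_value = 5
--     increment = 10
--
--     previous_value = 5
--
--     for key in range(1, num_pairs):
--         if key % 5 == 0:
--             data[key] = base_value
--             base_value += increment
--         else:
--             if key % 5 == 1:
--                 previous_value = data[key - 1] if key > 1 else previous_value
--             data[key] = 2 * previous_value
--             previous_value = data[key]
--
--     return data
-- ===== SOURCE B (Python) =====
-- def _value(key):
--     q, r = key // 5, key % 5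
--     if r == 0:
--         return 10 * q - 5
--     base = 5 if q == 0 else 10 * q - 5
--     return (2 ** r) * base
--
--
-- def generate_longer_window(num_pairs):
--     data = {}
--     for key in range(1, num_pairs):
--         data[key] = _value(key)
--     return data
-- ===== Notes on version B (the rewrite author's own statement) =====
-- stated objective: simpler
-- what changed: Replaced the stateful loop threading base_value/previous_value between iterations by a per-key closed-form value (q, r = divmod(key, 5) index formula), so each entry is computed independently.
import Mathlib
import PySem

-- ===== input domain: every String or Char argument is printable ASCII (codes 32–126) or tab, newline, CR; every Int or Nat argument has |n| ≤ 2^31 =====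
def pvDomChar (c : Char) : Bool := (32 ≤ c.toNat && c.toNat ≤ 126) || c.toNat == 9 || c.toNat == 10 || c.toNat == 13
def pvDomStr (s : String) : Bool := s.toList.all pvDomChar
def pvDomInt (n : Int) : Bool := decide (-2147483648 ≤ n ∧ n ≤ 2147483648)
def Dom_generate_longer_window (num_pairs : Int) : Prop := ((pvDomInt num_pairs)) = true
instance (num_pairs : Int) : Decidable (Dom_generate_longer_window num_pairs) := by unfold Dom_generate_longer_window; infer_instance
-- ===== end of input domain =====

-- B replaces A's stateful base_value/previous_value threading by an independent per-key closed-form value (simpler).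

-- ===== PORT A =====
-- one loop step of A; 'data[key - 1]' is ported via get?; the 'none' arm keeps previous_value,
-- but it is never taken: when key > 1 inside the loop, key - 1 was inserted on the previous pass
def glwStepA (st : PySem.Dict Int Int × Int × Int) (key : Int) : PySem.Dict Int Int × Int × Int :=
  let data := st.1
  let base_value := st.2.1
  let previous_value := st.2.2
  if PySem.Int.mod key 5 = 0 then
    (data.insert key base_value, base_value + 10, previous_value)
  else
    let previous_value :=
      if PySem.Int.mod key 5 = 1 then
        (if key > 1 then (match data.get? (key - 1) with
                          | some v => v
                          | none => previous_value)
         else previous_value)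
      else previous_value
    (data.insert key (2 * previous_value), base_value, 2 * previous_value)

def generate_longer_window (num_pairs : Int) : List (Int × Int) :=
  ((PySem.List.pyRange 1 num_pairs 1).foldl glwStepA (PySem.Dict.empty, 5, 5)).1.items

-- ===== PORT B =====
-- Source B's helper _value; '2 ** r' is ported as '2 ^ r.toNat', exact since r = key % 5 ≥ 0
def glwValue (key : Int) : Int :=
  let q := PySem.Int.floordiv key 5
  let r := PySem.Int.mod key 5
  if r = 0 then 10 * q - 5
  else
    let base := if q = 0 then 5 else 10 * q - 5
    2 ^ r.toNat * base

def generate_longer_window_alt (num_pairs : Int) : List (Int × Int) :=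
  ((PySem.List.pyRange 1 num_pairs 1).foldl
    (fun data key => data.insert key (glwValue key)) PySem.Dict.empty).items

-- ===== PRECONDITION & SPEC =====
def Spec_generate_longer_window (num_pairs : Int) (out : List (Int × Int)) : Prop := out = generate_longer_window_alt num_pairs
instance (num_pairs : Int) (out : List (Int × Int)) : Decidable (Spec_generate_longer_window num_pairs out) := by unfold Spec_generate_longer_window; infer_instance

-- ===== CLAIM (what is proved, stated in full; the proofs are below) =====
def Claim_equal_generate_longer_window : Prop := ∀ (num_pairs : Int), Dom_generate_longer_window num_pairs → Spec_generate_longer_window num_pairs (generate_longer_window num_pairs)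

-- ===== LEMMAS AND PROOFS =====

theorem glw_mod5 (a : Int) : PySem.Int.mod a 5 = a % 5 := PySem.Int.mod_eq_emod_of_pos (by norm_num)
theorem glw_div5 (a : Int) : PySem.Int.floordiv a 5 = a / 5 := PySem.Int.floordiv_eq_ediv_of_pos (by norm_num)

-- base_value and previous_value of A's state after processing keys 1..n-1
def glwBase (n : Int) : Int := 10 * ((n - 1) / 5) + 5
def glwPrev (n : Int) : Int :=
  if n ≤ 1 then 5
  else if (n - 1) % 5 = 0 then glwValue (n - 2) else glwValue (n - 1)

theorem glw_insert_fresh (m v : Int) :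
    (PySem.Dict.mk ((PySem.List.pyRange 1 m 1).map (fun k => (k, glwValue k)))).insert m v =
    PySem.Dict.mk ((PySem.List.pyRange 1 m 1).map (fun k => (k, glwValue k)) ++ [(m, v)]) := by
  apply PySem.Dict.ext
  rw [PySem.Dict.items_insert_of_not_contains]
  simp [PySem.Dict.contains_eq_decide_mem_keys, PySem.Dict.keys, List.map_map,
    PySem.List.mem_pyRange_one]

theorem glw_lookup (m : Int) (h1 : 1 ≤ m - 1) :
    (PySem.Dict.mk ((PySem.List.pyRange 1 m 1).map (fun k => (k, glwValue k)))).get? (m - 1)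
      = some (glwValue (m - 1)) := by
  apply PySem.Dict.get?_of_mem_items
  · exact List.mem_map_of_mem (by rw [PySem.List.mem_pyRange_one]; omega)
  · show (List.map _ _).map Prod.fst |>.Nodup
    simpa [List.map_map, Function.comp_def] using PySem.List.nodup_pyRange_one 1 m

-- arithmetic facts about the closed form
theorem glwValue_mod0 (m : Int) (_h1 : 1 ≤ m) (h0 : m % 5 = 0) : glwValue m = glwBase m := by
  unfold glwValue glwBase
  simp only [glw_mod5, glw_div5, if_pos h0]
  omega

theorem glwBase_step0 (m : Int) (h0 : m % 5 = 0) : glwBase m + 10 = glwBase (m + 1) := by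
  unfold glwBase; omega

theorem glwBase_stepNZ (m : Int) (h0 : ¬ m % 5 = 0) : glwBase m = glwBase (m + 1) := by
  unfold glwBase; omega

theorem glwPrev_step0 (m : Int) (h1 : 1 ≤ m) (h0 : m % 5 = 0) : glwPrev m = glwPrev (m + 1) := by
  unfold glwPrev
  have hA : ¬ (m ≤ 1) := by omega
  have hB : ¬ ((m - 1) % 5 = 0) := by omega
  have hC : ¬ (m + 1 ≤ 1) := by omega
  have hD : (m + 1 - 1) % 5 = 0 := by omega
  rw [if_neg hA, if_neg hB, if_neg hC, if_pos hD, show m + 1 - 2 = m - 1 by ring]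

theorem glwPrev_stepNZ (m : Int) (h1 : 1 ≤ m) (h0 : ¬ m % 5 = 0) : glwPrev (m + 1) = glwValue m := by
  unfold glwPrev
  have hC : ¬ (m + 1 ≤ 1) := by omega
  have hD : ¬ ((m + 1 - 1) % 5 = 0) := by omega
  rw [if_neg hC, if_neg hD, show m + 1 - 1 = m by ring]

theorem glwValue_after_block (m : Int) (h1 : 1 < m) (hr : m % 5 = 1) :
    2 * glwValue (m - 1) = glwValue m := by
  unfold glwValue
  simp only [glw_mod5, glw_div5]
  have e0 : (m - 1) % 5 = 0 := by omega
  have e1 : ¬ (m / 5 = 0) := by omega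
  rw [if_pos e0, if_neg, if_neg e1, hr]
  · norm_num
    omega
  · omega

theorem glwValue_double (m : Int) (_h1 : 1 ≤ m) (hr0 : ¬ m % 5 = 0) (hr1 : ¬ m % 5 = 1) :
    2 * glwValue (m - 1) = glwValue m := by
  unfold glwValue
  simp only [glw_mod5, glw_div5]
  have e0 : ¬ ((m - 1) % 5 = 0) := by omega
  rw [if_neg e0, if_neg hr0]
  have hq : (m - 1) / 5 = m / 5 := by omega
  have hr : ((m - 1) % 5).toNat + 1 = (m % 5).toNat := by omega
  rw [hq, ← hr, pow_succ]
  ring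

theorem glw_loopA (n : ℕ) (h : 1 ≤ n) :
    (PySem.List.pyRange 1 (n : Int) 1).foldl glwStepA (PySem.Dict.empty, 5, 5) =
      (PySem.Dict.mk ((PySem.List.pyRange 1 (n : Int) 1).map (fun k => (k, glwValue k))),
       glwBase (n : Int), glwPrev (n : Int)) := by
  induction n with
  | zero => omega
  | succ n ih =>
    rcases Nat.lt_or_ge n 1 with hn | hn
    · interval_cases n
      decide
    · have hcast : ((n + 1 : ℕ) : Int) = (n : Int) + 1 := by push_cast; ring
      have h1n : (1 : Int) ≤ (n : Int) := by exact_mod_cast hn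
      rw [hcast, PySem.List.pyRange_one_succ_right h1n, List.foldl_append, ih hn,
        List.map_append, List.foldl_cons, List.foldl_nil, List.map_cons, List.map_nil]
      set m : Int := (n : Int) with hm
      have hm1 : 1 ≤ m := h1n
      simp only [glwStepA, glw_mod5]
      by_cases h0 : m % 5 = 0
      · rw [if_pos h0]
        refine Prod.ext ?_ (Prod.ext ?_ ?_) <;> simp only
        · rw [glw_insert_fresh, glwValue_mod0 m hm1 h0]
        · exact glwBase_step0 m h0
        · exact glwPrev_step0 m hm1 h0
      · rw [if_neg h0]
        -- the inserted value 2 * previous_value equals glwValue m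
        have hval : (2 * (if m % 5 = 1 then
              (if m > 1 then (match (PySem.Dict.mk ((PySem.List.pyRange 1 m 1).map
                    (fun k => (k, glwValue k)))).get? (m - 1) with
                  | some v => v
                  | none => glwPrev m)
               else glwPrev m)
            else glwPrev m)) = glwValue m := by
          by_cases h1 : m % 5 = 1
          · rw [if_pos h1]
            by_cases hg : m > 1
            · rw [if_pos hg, glw_lookup m (by omega)]
              exact glwValue_after_block m hg h1
            · have hme : m = 1 := by omega
              rw [if_neg hg, hme]
              decide
          · rw [if_neg h1]
            have hA : ¬ (m ≤ 1) := by omega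
            have hC : ¬ ((m - 1) % 5 = 0) := by omega
            rw [glwPrev, if_neg hA, if_neg hC]
            exact glwValue_double m hm1 h0 h1
        refine Prod.ext ?_ (Prod.ext ?_ ?_) <;> simp only
        · rw [hval, glw_insert_fresh]
        · exact glwBase_stepNZ m h0
        · rw [glwPrev_stepNZ m hm1 h0, ← hval]

theorem glw_loopB (m : Int) :
    generate_longer_window_alt m = (PySem.List.pyRange 1 m 1).map (fun k => (k, glwValue k)) := by
  unfold generate_longer_window_alt
  rw [show (fun (data : PySem.Dict Int Int) key => data.insert key (glwValue key)) =
      (fun data a => data.insert ((fun x => x) a) (glwValue a)) from rfl,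
    PySem.Dict.items_foldl_insert_fresh]
  · simp [PySem.Dict.empty]
  · intro a _; exact PySem.Dict.contains_empty a
  · simpa using PySem.List.nodup_pyRange_one 1 m

-- ===== VERDICT (by name: the statement is the Claim_ definition above) =====
theorem generate_longer_window_spec : Claim_equal_generate_longer_window := by
  intro num_pairs _
  unfold Spec_generate_longer_window
  rw [glw_loopB]
  unfold generate_longer_window
  by_cases h : num_pairs ≤ 1
  · rw [PySem.List.pyRange_one_eq_nil h]
    rfl
  · have hc : num_pairs = ((num_pairs.toNat : ℕ) : Int) := by omega
    rw [hc, glw_loopA num_pairs.toNat (by omega)]
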